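-- pv_equiv track=rewrite | github.com/vipsh18/cs61a | recursion/pingpong.py | iterative_pingpong
-- ===== SOURCE A (Python) =====
-- def num_eights(x):
--     if x <= 9:
--         return 1 if x == 8 else 0
--     if x % 10 == 8:
--         return num_eights(x // 10) + 1
--     return num_eights(x // 10)
--
-- def iterative_pingpong(n):
--     value = 0
--     dir = -1
--     for i in range(1, n + 1):
--         if i % 8 == 1 or num_eights(i - 1) >= 1:
--             dir = -dir
--         value += dir
--
--     return value
-- ===== SOURCE B (Python) =====
-- def iterative_pingpong(n):
--     value = 0
--     dir = -1
--     cnt = 0  # number of 8-digits of i-1, maintained incrementally (eights(0) = 0)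
--     for i in range(1, n + 1):
--         if i % 8 == 1 or cnt >= 1:
--             dir = -dir
--         value += dir
--         # advance cnt from eights(i-1) to eights(i): strip trailing 9s, bump next digit
--         m = i - 1
--         while m % 10 == 9:
--             m //= 10
--         d = m % 10
--         if d == 7:
--             cnt += 1
--         elif d == 8:
--             cnt -= 1
--     return value
-- ===== Notes on version B (the rewrite author's own statement) =====
-- stated objective: faster
-- what changed: replaces the per-step recursive num_eights digit scan by an incrementally maintained count of digit eights (strip trailing nines, adjust on the bumped digit), making the loop body amortised constant time
import Mathlib
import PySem

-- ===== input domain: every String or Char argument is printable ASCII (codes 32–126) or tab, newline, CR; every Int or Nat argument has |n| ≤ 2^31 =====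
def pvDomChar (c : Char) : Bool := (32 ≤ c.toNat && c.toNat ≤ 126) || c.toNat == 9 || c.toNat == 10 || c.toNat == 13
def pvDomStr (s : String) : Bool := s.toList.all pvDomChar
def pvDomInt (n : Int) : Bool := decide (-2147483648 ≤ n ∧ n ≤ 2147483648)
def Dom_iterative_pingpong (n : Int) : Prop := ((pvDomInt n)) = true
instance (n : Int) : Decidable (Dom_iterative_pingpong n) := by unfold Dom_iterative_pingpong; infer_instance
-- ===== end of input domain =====

-- B replaces A's per-step recursive num_eights scan by an incrementally maintained
-- count of 8-digits (amortised O(1) per step), for an asymptotically faster loop.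

-- ===== PORT A =====
def num_eights (x : Int) : Int :=
  if x ≤ 9 then (if x = 8 then 1 else 0)
  else if PySem.Int.mod x 10 = 8 then num_eights (PySem.Int.floordiv x 10) + 1
  else num_eights (PySem.Int.floordiv x 10)
termination_by x.toNat
decreasing_by
  all_goals rw [PySem.Int.floordiv_eq_ediv_of_pos (by omega : (0:Int) < 10)]; omega

def iterative_pingpong (n : Int) : Int :=
  ((PySem.List.pyRange 1 (n + 1) 1).foldl
    (fun (s : Int × Int) i =>
      let dir := if PySem.Int.mod i 8 = 1 ∨ num_eights (i - 1) ≥ 1 then -s.2 else s.2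
      (s.1 + dir, dir)) (0, -1)).1

-- ===== PORT B =====
-- the inner 'while m % 10 == 9: m //= 10' loop; in B it runs on m = i-1 with i ≥ 1,
-- so the Nat recursion on (i-1).toNat is exact there
def strip9 (m : Nat) : Nat :=
  if m % 10 = 9 then strip9 (m / 10) else m
termination_by m
decreasing_by omega

def iterative_pingpong_alt (n : Int) : Int :=
  ((PySem.List.pyRange 1 (n + 1) 1).foldl
    (fun (s : Int × Int × Int) i =>
      let dir := if PySem.Int.mod i 8 = 1 ∨ s.2.2 ≥ 1 then -s.2.1 else s.2.1
      let value := s.1 + dir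
      let d := strip9 (i - 1).toNat % 10
      let cnt := if d = 7 then s.2.2 + 1 else if d = 8 then s.2.2 - 1 else s.2.2
      (value, dir, cnt)) (0, -1, 0)).1

-- ===== PRECONDITION & SPEC =====
def Spec_iterative_pingpong (n : Int) (out : Int) : Prop := out = iterative_pingpong_alt n
instance (n : Int) (out : Int) : Decidable (Spec_iterative_pingpong n out) := by unfold Spec_iterative_pingpong; infer_instance

-- ===== CLAIM (what is proved, stated in full; the proofs are below) =====
def Claim_equal_iterative_pingpong : Prop := ∀ (n : Int), Dom_iterative_pingpong n → Spec_iterative_pingpong n (iterative_pingpong n)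

-- ===== LEMMAS AND PROOFS =====
set_option maxRecDepth 4000

-- A's loop step / B's loop step, named for the proofs
def stepA (s : Int × Int) (i : Int) : Int × Int :=
  let dir := if PySem.Int.mod i 8 = 1 ∨ num_eights (i - 1) ≥ 1 then -s.2 else s.2
  (s.1 + dir, dir)

def stepB (s : Int × Int × Int) (i : Int) : Int × Int × Int :=
  let dir := if PySem.Int.mod i 8 = 1 ∨ s.2.2 ≥ 1 then -s.2.1 else s.2.1
  let value := s.1 + dir
  let d := strip9 (i - 1).toNat % 10
  let cnt := if d = 7 then s.2.2 + 1 else if d = 8 then s.2.2 - 1 else s.2.2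
  (value, dir, cnt)

lemma pingpong_eq_fold (n : Int) :
    iterative_pingpong n = ((PySem.List.pyRange 1 (n + 1) 1).foldl stepA (0, -1)).1 := rfl

lemma pingpong_alt_eq_fold (n : Int) :
    iterative_pingpong_alt n = ((PySem.List.pyRange 1 (n + 1) 1).foldl stepB (0, -1, 0)).1 := rfl

-- num_eights on a Nat cast, in Nat arithmetic
def neN (m : Nat) : Int :=
  if m ≤ 9 then (if m = 8 then 1 else 0)
  else if m % 10 = 8 then neN (m / 10) + 1 else neN (m / 10)
termination_by m
decreasing_by all_goals omega

lemma num_eights_natCast (m : Nat) : num_eights (m : Int) = neN m := by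
  induction m using Nat.strong_induction_on with
  | _ m ih =>
    rw [num_eights, neN]
    have h10 : PySem.Int.mod (m : Int) 10 = ((m % 10 : Nat) : Int) := by
      exact_mod_cast PySem.Int.mod_natCast m 10
    have hdiv : PySem.Int.floordiv (m : Int) 10 = ((m / 10 : Nat) : Int) := by
      exact_mod_cast PySem.Int.floordiv_natCast m 10
    by_cases hm : m ≤ 9
    · simp [hm, show (m : Int) ≤ 9 by exact_mod_cast hm]
      by_cases h8 : m = 8 <;> simp [h8] <;> omega
    · have hm' : ¬ ((m : Int) ≤ 9) := by exact_mod_cast hm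
      rw [if_neg hm', if_neg hm, h10, hdiv, ih (m / 10) (by omega)]
      by_cases h8 : m % 10 = 8
      · rw [if_pos h8, if_pos (by exact_mod_cast h8)]
      · rw [if_neg h8, if_neg (by exact_mod_cast h8)]

-- the delta B's incremental update adds when advancing from m to m+1
def delta (m : Nat) : Int :=
  if strip9 m % 10 = 7 then 1 else if strip9 m % 10 = 8 then -1 else 0

lemma neN_le9 {m : Nat} (h : m ≤ 9) : neN m = if m = 8 then 1 else 0 := by
  rw [neN, if_pos h]

lemma strip9_of_ne {m : Nat} (h : m % 10 ≠ 9) : strip9 m = m := by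
  rw [strip9, if_neg h]

lemma strip9_nine : strip9 9 = 0 := by
  rw [strip9, if_pos (by norm_num), strip9, if_neg (by norm_num)]

lemma neN_succ (m : Nat) : neN (m + 1) = neN m + delta m := by
  induction m using Nat.strong_induction_on with
  | _ m ih =>
    by_cases hsmall : m ≤ 9
    · by_cases h9 : m = 9
      · subst h9
        have h10 : neN 10 = 0 := by
          rw [neN, if_neg (by norm_num), if_neg (by norm_num)]
          norm_num [neN_le9]
        have hd : delta 9 = 0 := by
          unfold delta; rw [strip9_nine]; norm_num
        rw [show (9 : Nat) + 1 = 10 from rfl, h10, neN_le9 (by norm_num), hd]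
        norm_num
      · rw [neN_le9 (by omega), neN_le9 (by omega)]
        unfold delta
        rw [strip9_of_ne (by omega)]
        have hmm : m % 10 = m := by omega
        rw [hmm]
        split_ifs <;> omega
    · have hm : 10 ≤ m := by omega
      by_cases h9 : m % 10 = 9
      · -- trailing 9: both sides reduce to the prefix m / 10
        have hd : delta m = delta (m / 10) := by
          unfold delta; rw [strip9, if_pos h9]
        have h1 : neN (m + 1) = neN (m / 10 + 1) := by
          rw [neN]
          have : (m + 1) % 10 = 0 := by omega
          rw [if_neg (by omega), if_neg (by omega)]
          congr 1; omega
        have h2 : neN m = neN (m / 10) := by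
          rw [neN, if_neg (by omega), if_neg (by omega)]
        rw [h1, h2, hd, ih (m / 10) (by omega)]
      · -- last digit d ≤ 8 is bumped to d + 1
        have hδ : delta m =
            (if m % 10 = 7 then 1 else if m % 10 = 8 then (-1 : Int) else 0) := by
          unfold delta; rw [strip9, if_neg h9]
        have h1 : neN (m + 1) =
            neN (m / 10) + (if (m + 1) % 10 = 8 then 1 else 0) := by
          rw [neN, if_neg (by omega)]
          have : (m + 1) / 10 = m / 10 := by omega
          split_ifs <;> simp [this]
        have h2 : neN m = neN (m / 10) + (if m % 10 = 8 then 1 else 0) := by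
          rw [neN, if_neg (by omega)]
          split_ifs <;> simp
        rw [h1, h2, hδ]
        have : (m + 1) % 10 = m % 10 + 1 := by omega
        rw [this]
        split_ifs <;> omega

lemma loop_invariant (k : Nat) :
    (PySem.List.pyRange 1 ((k : Int) + 1) 1).foldl stepB (0, -1, 0) =
      (((PySem.List.pyRange 1 ((k : Int) + 1) 1).foldl stepA (0, -1)).1,
       ((PySem.List.pyRange 1 ((k : Int) + 1) 1).foldl stepA (0, -1)).2, neN k) := by
  induction k with
  | zero =>
    rw [PySem.List.pyRange_one_eq_nil (by omega)]
    simp [neN_le9]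
  | succ k ih =>
    have hsplit : PySem.List.pyRange 1 ((↑(k + 1) : Int) + 1) 1 =
        PySem.List.pyRange 1 ((k : Int) + 1) 1 ++ [(k : Int) + 1] := by
      have := PySem.List.pyRange_one_succ_right (a := 1) (b := (k : Int) + 1) (by omega)
      rw [show ((↑(k + 1) : Int) + 1) = ((k : Int) + 1) + 1 by push_cast; ring, this]
    rw [hsplit, List.foldl_append, List.foldl_append, ih]
    simp only [List.foldl_cons, List.foldl_nil]
    -- the single step at i = k + 1
    set a := (PySem.List.pyRange 1 ((k : Int) + 1) 1).foldl stepA (0, -1) with ha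
    unfold stepA stepB
    have hsub : ((k : Int) + 1) - 1 = (k : Int) := by ring
    have htoNat : (((k : Int) + 1) - 1).toNat = k := by omega
    have hne : num_eights (((k : Int) + 1) - 1) = neN k := by
      rw [hsub, num_eights_natCast]
    simp only [hne, htoNat]
    have hcnt : (if strip9 k % 10 = 7 then neN k + 1
        else if strip9 k % 10 = 8 then neN k - 1 else neN k) = neN (k + 1) := by
      rw [neN_succ]; unfold delta; split_ifs <;> ring
    rw [hcnt]

-- ===== VERDICT (by name: the statement is the Claim_ definition above) =====
theorem iterative_pingpong_spec : Claim_equal_iterative_pingpong := by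
  intro n _
  unfold Spec_iterative_pingpong
  rw [pingpong_eq_fold, pingpong_alt_eq_fold]
  by_cases hn : n ≤ 0
  · rw [PySem.List.pyRange_one_eq_nil (by omega)]
    rfl
  · have hk : n = ((n.toNat : Nat) : Int) := by omega
    rw [hk, loop_invariant n.toNat]
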